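-- pv_equiv track=rewrite | github.com/LazyMechanic/frequency-cryptanalysis-py | src/frequency_analysis.py | _get_word_bigrams
-- ===== SOURCE A (Python) =====
-- def _get_word_bigrams(word):
--     bigrams = {}
--     for i in range(0, len(word), 2):
--         bigram = word[i:i + 2]
--         if bigram in bigrams:
--             bigrams[bigram] += 1
--         else:
--             bigrams[bigram] = 1
--     return bigrams
-- ===== SOURCE B (Python) =====
-- def _get_word_bigrams(word):
--     # One streaming pass: buffer a pending char, emit 2-char chunks (plus a
--     # trailing 1-char chunk for odd length), then count with dict.get.
--     chunks = []
--     pending = None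
--     for ch in word:
--         if pending is None:
--             pending = ch
--         else:
--             chunks.append(pending + ch)
--             pending = None
--     if pending is not None:
--         chunks.append(pending)
--     counts = {}
--     for c in chunks:
--         counts[c] = counts.get(c, 0) + 1
--     return counts
-- ===== Notes on version B (the rewrite author's own statement) =====
-- stated objective: alternative
-- what changed: Replaces the step-2 index loop taking word[i:i+2] slices and the membership-test dict update by a single character-streaming pass with a pending-char buffer that emits chunks, counted with dict.get(c,0)+1.
import Mathlib
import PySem

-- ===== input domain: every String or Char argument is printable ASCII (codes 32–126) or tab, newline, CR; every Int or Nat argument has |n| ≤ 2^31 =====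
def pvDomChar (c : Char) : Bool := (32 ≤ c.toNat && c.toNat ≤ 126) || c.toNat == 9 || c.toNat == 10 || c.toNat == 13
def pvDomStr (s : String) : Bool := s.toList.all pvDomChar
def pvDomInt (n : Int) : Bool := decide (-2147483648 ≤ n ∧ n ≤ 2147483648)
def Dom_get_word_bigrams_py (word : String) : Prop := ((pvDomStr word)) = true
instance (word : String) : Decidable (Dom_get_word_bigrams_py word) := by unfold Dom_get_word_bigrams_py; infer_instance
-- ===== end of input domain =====

-- B replaces A's step-2 index loop over string slices by a single streaming pass with a
-- pending-character buffer and a get-default counting dict (objective: alternative decomposition).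

-- ===== PORT A =====
def get_word_bigrams_py (word : String) : List (String × Int) :=
  ((PySem.List.pyRange 0 (PySem.Str.len word) 2).foldl
    (fun (bigrams : PySem.Dict String Int) i =>
      let bigram := PySem.Str.slice word (some i) (some (i + 2))
      if bigrams.contains bigram then bigrams.modify bigram 0 (· + 1)
      else bigrams.insert bigram 1)
    PySem.Dict.empty).items

-- ===== PORT B =====
-- one loop iteration of B's first pass (pending buffer)
def pvStep (st : List String × Option Char) (ch : Char) : List String × Option Char :=
  match st.2 with
  | none => (st.1, some ch)
  | some p => (st.1 ++ [String.ofList [p, ch]], none)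

-- B's trailing 'if pending is not None' flush
def pvFlush (st : List String × Option Char) : List String :=
  match st.2 with
  | some p => st.1 ++ [String.ofList [p]]
  | none => st.1

def get_word_bigrams_py_alt (word : String) : List (String × Int) :=
  let chunks := pvFlush (word.toList.foldl pvStep ([], none))
  (chunks.foldl (fun (d : PySem.Dict String Int) c => d.insert c (d.getD c 0 + 1))
    PySem.Dict.empty).items

-- ===== PRECONDITION & SPEC =====
def Spec_get_word_bigrams_py (word : String) (out : List (String × Int)) : Prop := out = get_word_bigrams_py_alt word
instance (word : String) (out : List (String × Int)) : Decidable (Spec_get_word_bigrams_py word out) := by unfold Spec_get_word_bigrams_py; infer_instance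

-- ===== CLAIM (what is proved, stated in full; the proofs are below) =====
def Claim_equal_get_word_bigrams_py : Prop := ∀ (word : String), Dom_get_word_bigrams_py word → Spec_get_word_bigrams_py word (get_word_bigrams_py word)

-- ===== LEMMAS AND PROOFS =====

-- the list of chunks both programs count: 2-char blocks, a lone last char for odd length
def pairChunks : List Char → List String
  | [] => []
  | [a] => [String.ofList [a]]
  | a :: _b :: r => String.ofList [a, _b] :: pairChunks r

theorem flush_foldl_pvStep (cs : List Char) : ∀ acc : List String,
    pvFlush (cs.foldl pvStep (acc, none)) = acc ++ pairChunks cs := by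
  induction cs using pairChunks.induct with
  | case1 => intro acc; simp [pvFlush, pairChunks]
  | case2 a => intro acc; simp [pvStep, pvFlush, pairChunks]
  | case3 a b r ih =>
    intro acc
    simp only [List.foldl_cons, pvStep, pairChunks]
    rw [ih (acc ++ [String.ofList [a, b]])]
    simp

theorem range_halves_eq_pairChunks (cs : List Char) :
    (List.range ((cs.length + 1) / 2)).map
      (fun k => String.ofList ((cs.drop (2 * k)).take 2)) = pairChunks cs := by
  induction cs using pairChunks.induct with
  | case1 => simp [pairChunks]
  | case2 a => simp [pairChunks, List.range_succ]
  | case3 a b r ih =>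
    have hlen : ((a :: b :: r).length + 1) / 2 = (r.length + 1) / 2 + 1 := by
      simp [List.length_cons]; omega
    rw [hlen, List.range_succ_eq_map, List.map_cons, List.map_map, pairChunks]
    simp only [Nat.mul_zero, List.drop_zero, List.take_succ_cons, List.take_zero]
    refine congrArg₂ List.cons rfl ?_
    rw [← ih]
    apply List.map_congr_left
    intro k _
    simp only [Function.comp_apply, Nat.succ_eq_add_one]
    congr 2

theorem pyRange_two_map_slice (cs : List Char) :
    (PySem.List.pyRange 0 (cs.length : Int) 2).map
      (fun i => String.ofList (PySem.List.slice cs (some i) (some (i + 2)))) =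
    pairChunks cs := by
  rw [PySem.List.pyRange_of_pos 0 (cs.length : Int) (by omega)]
  rw [← range_halves_eq_pairChunks cs]
  have hcnt : (if (0:Int) < (cs.length : Int)
      then (((cs.length : Int) - 0 + 2 - 1) / 2).toNat else 0) = (cs.length + 1) / 2 := by
    split_ifs with h
    · omega
    · omega
  rw [hcnt, List.map_map]
  apply List.map_congr_left
  intro k _
  simp only [Function.comp_apply, zero_add]
  congr 1
  have h2k : (2 : Int) * (k : Nat) = ((2 * k : Nat) : Int) := by push_cast; ring
  have h2k2 : (2 : Int) * (k : Nat) + 2 = ((2 * k : Nat) : Int) + ((2 : Nat) : Int) := by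
    push_cast; ring
  rw [h2k2, h2k, PySem.List.slice_natCast_add]

theorem step_fun_eq (d : PySem.Dict String Int) (b : String) :
    (if d.contains b then d.modify b 0 (· + 1) else d.insert b 1) =
    d.insert b (d.getD b 0 + 1) := by
  by_cases h : d.contains b
  · simp [h, PySem.Dict.modify]
  · rw [if_neg h, PySem.Dict.getD_of_not_contains d 0 (by simpa using h)]
    norm_num

-- ===== VERDICT (by name: the statement is the Claim_ definition above) =====
theorem get_word_bigrams_py_spec : Claim_equal_get_word_bigrams_py := by
  intro word _
  unfold Spec_get_word_bigrams_py get_word_bigrams_py get_word_bigrams_py_alt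
  rw [flush_foldl_pvStep word.toList []]
  simp only [List.nil_append, PySem.Str.len_eq]
  have hA : (PySem.List.pyRange 0 (word.toList.length : Int) 2).foldl
      (fun (bigrams : PySem.Dict String Int) i =>
        let bigram := PySem.Str.slice word (some i) (some (i + 2))
        if bigrams.contains bigram then bigrams.modify bigram 0 (· + 1)
        else bigrams.insert bigram 1)
      PySem.Dict.empty =
      (pairChunks word.toList).foldl
        (fun (d : PySem.Dict String Int) c => d.insert c (d.getD c 0 + 1))
        PySem.Dict.empty := by
    rw [← pyRange_two_map_slice word.toList, List.foldl_map]
    apply PySem.List.foldl_congr_mem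
    intro d i _
    show (if _ then _ else _) = _
    rw [step_fun_eq]
    simp [PySem.Str.slice, PySem.Chars.slice]
  rw [hA]
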